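-- pv_equiv track=rewrite | github.com/yolomeus/advent-of-code | 2025/day_01.py | part1
-- ===== SOURCE A (Python) =====
-- def part1(nums: tuple[int, ...]) -> int:
--     zero_count = 0
--
--     dial = 50
--     for num in nums:
--         dial = (dial + num) % 100
--
--         if dial == 0:
--             zero_count += 1
--
--     return zero_count
-- ===== SOURCE B (Python) =====
-- def part1(nums):
--     # Divide and conquer: go(seg, offset) returns (zero_hits, segment_sum),
--     # where zero_hits counts prefixes p of seg with (offset + sum(p)) % 100 == 0.
--     # Correct because a hit in the right half at prefix p corresponds to the
--     # full prefix left + p, whose running total is offset + sum(left) + sum(p).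
--     def go(seg, offset):
--         if len(seg) <= 1:
--             if not seg:
--                 return 0, 0
--             s = seg[0]
--             return (1 if (offset + s) % 100 == 0 else 0), s
--         mid = len(seg) // 2
--         c1, s1 = go(seg[:mid], offset)
--         c2, s2 = go(seg[mid:], offset + s1)
--         return c1 + c2, s1 + s2
--     return go(nums, 50)[0]
-- ===== Notes on version B (the rewrite author's own statement) =====
-- stated objective: alternative
-- what changed: Replaces A's single fused left-to-right mod-100 dial loop with a recursive divide-and-conquer: each half returns (hit count, segment sum) and the right half is solved with the left sum as offset.
import Mathlib
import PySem

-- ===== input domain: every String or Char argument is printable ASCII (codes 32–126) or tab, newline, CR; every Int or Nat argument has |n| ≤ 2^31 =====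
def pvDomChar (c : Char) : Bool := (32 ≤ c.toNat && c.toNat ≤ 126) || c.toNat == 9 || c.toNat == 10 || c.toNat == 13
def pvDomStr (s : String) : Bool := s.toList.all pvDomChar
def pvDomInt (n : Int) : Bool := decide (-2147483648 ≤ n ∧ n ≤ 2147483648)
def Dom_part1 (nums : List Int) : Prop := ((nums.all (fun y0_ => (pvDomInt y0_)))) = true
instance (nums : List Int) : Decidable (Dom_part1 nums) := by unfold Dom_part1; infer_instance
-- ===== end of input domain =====

-- B replaces A's fused mod-100 dial loop by a divide-and-conquer recursion returning
-- (hit count, segment sum); A and B agree on all inputs.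

-- ===== PORT A =====
-- fused loop: maintain (dial, zero_count), dial reduced mod 100 each step
def part1 (nums : List Int) : Int :=
  (nums.foldl
    (fun (st : Int × Int) num =>
      let dial := PySem.Int.mod (st.1 + num) 100
      (dial, if dial = 0 then st.2 + 1 else st.2))
    (50, 0)).2

-- ===== PORT B =====
-- go(seg, offset) = (count of prefixes p with (offset + sum p) % 100 == 0, sum seg)
def part1Go (seg : List Int) (off : Int) : Int × Int :=
  if _h : seg.length ≤ 1 then
    match seg with
    | [] => (0, 0)
    | s :: _ => ((if PySem.Int.mod (off + s) 100 = 0 then 1 else 0), s)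
  else
    let mid := seg.length / 2
    let p1 := part1Go (seg.take mid) off
    let p2 := part1Go (seg.drop mid) (off + p1.2)
    (p1.1 + p2.1, p1.2 + p2.2)
termination_by seg.length
decreasing_by
  · simp only [List.length_take]; omega
  · simp only [List.length_drop]; omega

def part1_alt (nums : List Int) : Int := (part1Go nums 50).1

-- ===== PRECONDITION & SPEC =====
def Spec_part1 (nums : List Int) (out : Int) : Prop := out = part1_alt nums
instance (nums : List Int) (out : Int) : Decidable (Spec_part1 nums out) := by unfold Spec_part1; infer_instance

-- ===== CLAIM (what is proved, stated in full; the proofs are below) =====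
def Claim_equal_part1 : Prop := ∀ (nums : List Int), Dom_part1 nums → Spec_part1 nums (part1 nums)

-- ===== LEMMAS AND PROOFS =====

-- reference count: number of prefixes whose running total from off is ≡ 0 mod 100
def cntRef : List Int → Int → Int
  | [], _ => 0
  | n :: rest, off =>
    (if PySem.Int.mod (off + n) 100 = 0 then 1 else 0) + cntRef rest (off + n)

theorem cntRef_append (l r : List Int) : ∀ off,
    cntRef (l ++ r) off = cntRef l off + cntRef r (off + l.sum) := by
  induction l with
  | nil => intro off; simp [cntRef]
  | cons n rest ih =>
    intro off
    simp only [List.cons_append, cntRef, ih, List.sum_cons]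
    ring_nf

theorem part1Go_eq_aux : ∀ (n : Nat) (seg : List Int), seg.length ≤ n →
    ∀ off, part1Go seg off = (cntRef seg off, seg.sum) := by
  intro n
  induction n with
  | zero =>
    intro seg h off
    have hs : seg = [] := List.eq_nil_of_length_eq_zero (by omega)
    subst hs
    simp [part1Go, cntRef]
  | succ n ih =>
    intro seg h off
    by_cases h1 : seg.length ≤ 1
    · cases seg with
      | nil => simp [part1Go, cntRef]
      | cons s t =>
        have ht : t = [] := by
          cases t with
          | nil => rfl
          | cons a b => simp at h1
        subst ht
        simp [part1Go, cntRef]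
    · rw [part1Go, dif_neg h1]
      have hT := ih (seg.take (seg.length / 2)) (by simp [List.length_take]; omega) off
      have hD := ih (seg.drop (seg.length / 2)) (by simp [List.length_drop]; omega)
        (off + (seg.take (seg.length / 2)).sum)
      simp only [hT, hD]
      have hs : cntRef seg off
          = cntRef (seg.take (seg.length / 2)) off
            + cntRef (seg.drop (seg.length / 2)) (off + (seg.take (seg.length / 2)).sum) := by
        conv_lhs => rw [← List.take_append_drop (seg.length / 2) seg]
        rw [cntRef_append]
      have hsum : seg.sum = (seg.take (seg.length / 2)).sum + (seg.drop (seg.length / 2)).sum := by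
        conv_lhs => rw [← List.take_append_drop (seg.length / 2) seg]
        rw [List.sum_append]
      rw [hs, hsum]

theorem part1Go_eq (seg : List Int) (off : Int) :
    part1Go seg off = (cntRef seg off, seg.sum) :=
  part1Go_eq_aux seg.length seg le_rfl off

-- A's fold with dial = s % 100 and count c computes c + cntRef nums s
theorem part1_loop_eq (nums : List Int) : ∀ (s c : Int),
    (nums.foldl
      (fun (st : Int × Int) num =>
        let dial := PySem.Int.mod (st.1 + num) 100
        (dial, if dial = 0 then st.2 + 1 else st.2))
      (PySem.Int.mod s 100, c)).2 = c + cntRef nums s := by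
  induction nums with
  | nil => intro s c; simp [cntRef]
  | cons n rest ih =>
    intro s c
    have hmod : PySem.Int.mod (PySem.Int.mod s 100 + n) 100 = PySem.Int.mod (s + n) 100 := by
      simp [PySem.Int.mod]
    simp only [List.foldl_cons, hmod, cntRef]
    rw [ih (s + n)]
    split_ifs <;> ring

-- ===== VERDICT (by name: the statement is the Claim_ definition above) =====
theorem part1_spec : Claim_equal_part1 := by
  intro nums _
  unfold Spec_part1 part1 part1_alt
  have h50 : (50 : Int) = PySem.Int.mod 50 100 := by decide
  rw [h50, part1_loop_eq nums 50 0, part1Go_eq]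
  simp
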